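-- pv_equiv track=rewrite | github.com/chenyuhanjcu/prac_09 | cleanup_files.py | get_fixed_filename
-- ===== SOURCE A (Python) =====
-- def get_fixed_filename(filename):
--     """Return a 'fixed' version of filename."""
--     file_name = filename.split(".")  # split .txt with prefix
--     prefix = file_name[0]   # only keep prefix now
--     new_prefix = ""
--     for index, char in enumerate(prefix):
--         if char.isupper() and index != 0 and prefix[index - 1] != " ":
--             char = " " + char
--         new_prefix += char  # separate different words
--     capital_prefix = ""
--     for chuck in new_prefix.split():
--         chuck = chuck.title()
--         capital_prefix += chuck + "_"  # create capitalized words with "_"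
--     capital_prefix = capital_prefix[:-1]
--     new_name = capital_prefix + ".txt"  # add txt file type
--     return new_name
-- ===== SOURCE B (Python) =====
-- def get_fixed_filename(filename):
--     """Return a 'fixed' version of filename."""
--     prefix = filename.split(".")[0]
--     words = []
--     buf = ""
--     for ch in prefix:
--         if ch.isspace():
--             if buf:
--                 words.append(buf)
--             buf = ""
--         elif ch.isupper() and buf:
--             words.append(buf)
--             buf = ch
--         else:
--             buf += ch
--     if buf:
--         words.append(buf)
--     return "_".join(w.title() for w in words) + ".txt"
-- ===== Notes on version B (the rewrite author's own statement) =====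
-- stated objective: alternative
-- what changed: Replaces A's two sequential passes (insert spaces before inner uppercase letters into an intermediate string, then re-split that string on whitespace and join with '_') by a single word-accumulating pass over the prefix that maintains a current-word buffer, flushing it on whitespace or before an uppercase letter, then titles and '_'-joins the word list.
import Mathlib
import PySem

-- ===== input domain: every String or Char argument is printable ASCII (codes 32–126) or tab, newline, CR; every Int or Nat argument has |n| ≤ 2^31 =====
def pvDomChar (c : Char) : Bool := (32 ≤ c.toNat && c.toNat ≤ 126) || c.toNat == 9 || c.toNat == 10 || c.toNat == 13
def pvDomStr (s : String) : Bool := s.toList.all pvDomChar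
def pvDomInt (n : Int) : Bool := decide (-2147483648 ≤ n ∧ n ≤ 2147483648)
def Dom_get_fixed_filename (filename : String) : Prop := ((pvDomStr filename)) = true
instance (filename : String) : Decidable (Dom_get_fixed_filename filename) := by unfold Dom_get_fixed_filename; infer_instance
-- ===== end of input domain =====

-- B replaces A's insert-spaces-then-resplit two-pass shape by a single word-accumulating pass (alternative decomposition, same cost).

-- shared helper: port of str.title() (exact on ASCII, where Python's "cased" characters are exactly the letters)
def pyTitle (cs : List Char) : List Char :=
  (cs.foldl (fun (st : List Char × Bool) c =>
      if PySem.Chars.isalpha c = true then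
        (st.1 ++ [if st.2 then PySem.Chars.lowerChar c else PySem.Chars.upperChar c], true)
      else (st.1 ++ [c], false)) ([], false)).1

-- ===== PORT A =====
def get_fixed_filename (filename : String) : String :=
  let file_name := PySem.Chars.splitOn filename.toList ['.']
  -- split(".") always returns a non-empty list, so file_name[0] never raises; .getD [] is unreachable
  let pfx := (PySem.List.pyGet? file_name 0).getD []
  let new_prefix := (PySem.List.enumerate pfx).foldl
    (fun acc ic =>
      acc ++ (if PySem.Chars.isupper ic.2 = true ∧ ic.1 ≠ 0 ∧ PySem.List.pyGet? pfx (ic.1 - 1) ≠ some ' '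
              then [' ', ic.2] else [ic.2])) []
  let capital_prefix := (PySem.Chars.split₀ new_prefix).foldl
    (fun acc chuck => acc ++ (pyTitle chuck ++ ['_'])) []
  let capital_prefix := PySem.List.slice capital_prefix none (some (-1))
  String.ofList (capital_prefix ++ ['.','t','x','t'])

-- ===== PORT B =====
def get_fixed_filename_alt (filename : String) : String :=
  let pfx := (PySem.List.pyGet? (PySem.Chars.splitOn filename.toList ['.']) 0).getD []
  let st := pfx.foldl (fun (st : List (List Char) × List Char) ch =>
      if PySem.Chars.isspace ch = true then
        (if st.2 ≠ [] then st.1 ++ [st.2] else st.1, [])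
      else if PySem.Chars.isupper ch = true ∧ st.2 ≠ [] then (st.1 ++ [st.2], [ch])
      else (st.1, st.2 ++ [ch])) (([], []) : List (List Char) × List Char)
  let words := if st.2 ≠ [] then st.1 ++ [st.2] else st.1
  String.ofList (PySem.Chars.join ['_'] (words.map pyTitle) ++ ['.','t','x','t'])

-- ===== PRECONDITION & SPEC =====
def Spec_get_fixed_filename (filename : String) (out : String) : Prop := out = get_fixed_filename_alt filename
instance (filename : String) (out : String) : Decidable (Spec_get_fixed_filename filename out) := by unfold Spec_get_fixed_filename; infer_instance

-- ===== CLAIM (what is proved, stated in full; the proofs are below) =====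
def Claim_equal_get_fixed_filename : Prop := ∀ (filename : String), Dom_get_fixed_filename filename → Spec_get_fixed_filename filename (get_fixed_filename filename)

-- ===== LEMMAS AND PROOFS =====

-- A's first loop, as a right recursion carrying the previous character of the prefix
def insA : Option Char → List Char → List Char
  | _, [] => []
  | prev, c :: t =>
      (if PySem.Chars.isupper c = true ∧ prev ≠ none ∧ prev ≠ some ' '
       then [' ', c] else [c]) ++ insA (some c) t

-- str.split() with an explicit open-word buffer (left-to-right form of split₀.go)
def splitAux : List Char → List Char → List (List Char)
  | buf, [] => if buf = [] then [] else [buf]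
  | buf, c :: t =>
      if PySem.Chars.isspace c = true then
        (if buf = [] then splitAux [] t else buf :: splitAux [] t)
      else splitAux (buf ++ [c]) t

-- B's word machine: the words still to be produced from buffer `buf` and remaining input
def goB : List Char → List Char → List (List Char)
  | buf, [] => if buf = [] then [] else [buf]
  | buf, c :: t =>
      if PySem.Chars.isspace c = true then
        (if buf = [] then goB [] t else buf :: goB [] t)
      else if PySem.Chars.isupper c = true ∧ buf ≠ [] then buf :: goB [c] t
      else goB (buf ++ [c]) t

theorem isspace_of_isupper (c : Char) (h : PySem.Chars.isupper c = true) :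
    PySem.Chars.isspace c = false := by
  simp only [PySem.Chars.isupper, Bool.and_eq_true, decide_eq_true_eq, Char.le_def,
    UInt32.le_iff_toNat_le] at h
  simp only [PySem.Chars.isspace, Char.toNat]
  obtain ⟨h1, h2⟩ := h
  simp only [Bool.or_eq_false_iff, Bool.and_eq_false_iff, decide_eq_false_iff_not]
  have ha : ('A'.val.toNat) = 65 := rfl
  have hz : ('Z'.val.toNat) = 90 := rfl
  omega

theorem isspace_space : PySem.Chars.isspace ' ' = true := by decide

theorem split₀_go_eq (s : List Char) : ∀ (cur : List Char) (acc : List (List Char)),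
    PySem.Chars.split₀.go s cur acc = acc.reverse ++ splitAux cur.reverse s := by
  induction s with
  | nil =>
      intro cur acc
      by_cases h : cur = [] <;> simp [PySem.Chars.split₀.go, splitAux, h]
  | cons c t ih =>
      intro cur acc
      by_cases hs : PySem.Chars.isspace c = true
      · by_cases h : cur = []
        · simp [PySem.Chars.split₀.go, splitAux, hs, h, ih]
        · simp [PySem.Chars.split₀.go, splitAux, hs, h, ih, List.isEmpty_iff]
      · simp only [Bool.not_eq_true] at hs
        simp [PySem.Chars.split₀.go, splitAux, hs, ih]

theorem split₀_eq_splitAux (s : List Char) : PySem.Chars.split₀ s = splitAux [] s := by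
  simpa using split₀_go_eq s [] []

-- the central lemma: A's insert-then-split equals B's word machine
theorem splitAux_insA (P : List Char) : ∀ (buf : List Char) (prev : Option Char),
    (buf ≠ [] → ∃ p, prev = some p ∧ PySem.Chars.isspace p = false) →
    (buf = [] → prev = none ∨ ∃ p, prev = some p ∧ PySem.Chars.isspace p = true) →
    splitAux buf (insA prev P) = goB buf P := by
  induction P with
  | nil => intro buf prev _ _; simp [insA, splitAux, goB]
  | cons c t ih =>
      intro buf prev h1 h2
      by_cases hs : PySem.Chars.isspace c = true
      · -- c is whitespace, hence not uppercase: no space inserted, both sides flush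
        have hu : PySem.Chars.isupper c = false := by
          by_contra h
          simp only [Bool.not_eq_false] at h
          rw [isspace_of_isupper c h] at hs; exact Bool.false_ne_true hs
        have htail := ih [] (some c) (by intro h; exact absurd rfl h)
          (fun _ => Or.inr ⟨c, rfl, hs⟩)
        by_cases hb : buf = []
        · simp [insA, hu, splitAux, hs, hb, goB, htail]
        · simp [insA, hu, splitAux, hs, hb, goB, htail]
      · simp only [Bool.not_eq_true] at hs
        by_cases hu : PySem.Chars.isupper c = true
        · by_cases hb : buf = []
          · -- word starts fresh: any inserted space is absorbed by split()
            have htail := ih [c] (some c) (fun _ => ⟨c, rfl, hs⟩) (by intro h; simp at h)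
            rcases h2 hb with hp | ⟨p, hp, hsp⟩
            · subst hp hb
              simp [insA, hu, splitAux, hs, goB, htail]
            · subst hp hb
              by_cases hpe : p = ' '
              · simp [insA, hu, hpe, splitAux, hs, goB, htail]
              · simp [insA, hu, hpe, splitAux, hs, goB, htail, isspace_space]
          · -- mid-word uppercase: A inserts ' ', B flushes the buffer
            obtain ⟨p, hp, hsp⟩ := h1 hb
            have hpe : p ≠ ' ' := by rintro rfl; simp [PySem.Chars.isspace] at hsp
            have htail := ih [c] (some c) (fun _ => ⟨c, rfl, hs⟩) (by intro h; simp at h)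
            subst hp
            simp [insA, hu, hpe, splitAux, hs, hb, goB, htail, isspace_space]
        · -- ordinary character: appended to the open word on both sides
          simp only [Bool.not_eq_true] at hu
          have htail := ih (buf ++ [c]) (some c) (fun _ => ⟨c, rfl, hs⟩) (by intro h; simp at h)
          simp [insA, hu, splitAux, hs, goB, htail]

-- B's foldl machine produces exactly goB
def finishB (st : List (List Char) × List Char) : List (List Char) :=
  if st.2 ≠ [] then st.1 ++ [st.2] else st.1

def stepB (st : List (List Char) × List Char) (ch : Char) : List (List Char) × List Char :=
  if PySem.Chars.isspace ch = true then
    (if st.2 ≠ [] then st.1 ++ [st.2] else st.1, [])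
  else if PySem.Chars.isupper ch = true ∧ st.2 ≠ [] then (st.1 ++ [st.2], [ch])
  else (st.1, st.2 ++ [ch])

theorem foldB_eq (P : List Char) : ∀ (ws : List (List Char)) (buf : List Char),
    finishB (P.foldl stepB (ws, buf)) = ws ++ goB buf P := by
  induction P with
  | nil =>
      intro ws buf
      by_cases hb : buf = [] <;> simp [finishB, goB, hb]
  | cons c t ih =>
      intro ws buf
      rw [List.foldl_cons]
      by_cases hs : PySem.Chars.isspace c = true
      · by_cases hb : buf = []
        · subst hb
          rw [show stepB (ws, []) c = (ws, []) from by simp [stepB, hs], ih]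
          simp [goB, hs]
        · rw [show stepB (ws, buf) c = (ws ++ [buf], []) from by simp [stepB, hs, hb], ih]
          simp [goB, hs, hb]
      · simp only [Bool.not_eq_true] at hs
        by_cases hu : PySem.Chars.isupper c = true ∧ buf ≠ []
        · rw [show stepB (ws, buf) c = (ws ++ [buf], [c]) from by simp [stepB, hs, hu], ih]
          simp [goB, hs, hu]
        · rw [show stepB (ws, buf) c = (ws, buf ++ [c]) from by simp [stepB, hs, hu], ih]
          simp [goB, hs, hu]

-- A's enumerate loop equals insA (the previous character read through pyGet? is pre.getLast?)
theorem enum_insA (t : List Char) : ∀ (pre : List Char),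
    (PySem.List.enumerate t (pre.length : Int)).flatMap
      (fun ic => if PySem.Chars.isupper ic.2 = true ∧ ic.1 ≠ 0 ∧
                    PySem.List.pyGet? (pre ++ t) (ic.1 - 1) ≠ some ' '
                 then [' ', ic.2] else [ic.2])
    = insA pre.getLast? t := by
  induction t with
  | nil => intro pre; simp [PySem.List.enumerate, insA]
  | cons c s ih =>
      intro pre
      have hstep : PySem.List.enumerate (c :: s) (pre.length : Int)
          = ((pre.length : Int), c) :: PySem.List.enumerate s ((pre.length : Int) + 1) := rfl
      rw [hstep, List.flatMap_cons]
      have happ : pre ++ c :: s = pre ++ [c] ++ s := by simp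
      rw [happ]
      have hlen : ((pre ++ [c]).length : Int) = (pre.length : Int) + 1 := by
        simp
      have htail := ih (pre ++ [c])
      rw [hlen] at htail
      rw [htail]
      have hlast : (pre ++ [c]).getLast? = some c := by simp
      rw [hlast]
      -- now compare the head contribution with insA's head branch
      rcases List.eq_nil_or_concat pre with hpre | ⟨q, p, hpre⟩
      · subst hpre
        simp [insA]
      · rw [List.concat_eq_append] at hpre
        subst hpre
        have hne : (((q ++ [p]).length : Int)) ≠ 0 := by
          simp only [List.length_append, List.length_cons, List.length_nil, Nat.cast_add,
            Nat.cast_one, Nat.cast_zero]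
          omega
        have hne' : ¬((q.length : Int) + 1 = 0) := by omega
        have hget : PySem.List.pyGet? (q ++ [p] ++ [c] ++ s) (((q ++ [p]).length : Int) - 1)
            = some p := by
          have h1 : ((q ++ [p]).length : Int) - 1 = ((q.length : Nat) : Int) := by
            simp only [List.length_append, List.length_cons, List.length_nil, Nat.cast_add,
              Nat.cast_one, Nat.cast_zero]
            omega
          rw [h1, PySem.List.pyGet?_natCast]
          have h2 : q ++ [p] ++ [c] ++ s = q ++ (p :: c :: s) := by simp
          rw [h2]
          simp
        rw [hget]
        have hlastp : (q ++ [p]).getLast? = some p := by simp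
        rw [hlastp]
        by_cases hu : PySem.Chars.isupper c = true
        · by_cases hp : p = ' '
          · simp [insA, hu, hp, hne']
          · simp [insA, hu, hp, hne']
        · simp [insA, hu]

-- join with '_' is the drop-last of the append-'_'-after-each-word fold
theorem flatMap_underscore_join (vs : List (List Char)) :
    (vs.flatMap (fun w => w ++ ['_'])).dropLast = PySem.Chars.join ['_'] vs := by
  induction vs with
  | nil => simp [PySem.Chars.join_nil]
  | cons w rest ih =>
      cases rest with
      | nil => simp [PySem.Chars.join, List.intercalate]
      | cons v rest' =>
          rw [PySem.Chars.join_cons_cons]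
          have hne : (v :: rest').flatMap (fun w => w ++ ['_']) ≠ [] := by
            simp [List.flatMap_cons]
          rw [List.flatMap_cons]
          rw [List.dropLast_append_of_ne_nil hne]
          rw [ih]

-- ===== VERDICT (by name: the statement is the Claim_ definition above) =====
theorem get_fixed_filename_spec : Claim_equal_get_fixed_filename := by
  intro filename _
  unfold Spec_get_fixed_filename get_fixed_filename get_fixed_filename_alt
  dsimp only []
  set P := (PySem.List.pyGet? (PySem.Chars.splitOn filename.toList ['.']) 0).getD [] with hP
  -- A's first loop = insA none P
  have hfold := PySem.List.foldl_append_eq_flatMap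
      (fun ic : Int × Char =>
        if PySem.Chars.isupper ic.2 = true ∧ ic.1 ≠ 0 ∧ PySem.List.pyGet? P (ic.1 - 1) ≠ some ' '
        then [' ', ic.2] else [ic.2])
      (PySem.List.enumerate P) []
  have hA1 : (PySem.List.enumerate P).foldl
      (fun acc ic =>
        acc ++ (if PySem.Chars.isupper ic.2 = true ∧ ic.1 ≠ 0 ∧ PySem.List.pyGet? P (ic.1 - 1) ≠ some ' '
                then [' ', ic.2] else [ic.2])) [] = insA none P := by
    rw [hfold]
    have := enum_insA P []
    simpa using this
  rw [hA1]
  -- split₀ of A's spaced string = B's word list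
  have hwords : PySem.Chars.split₀ (insA none P) = goB [] P := by
    rw [split₀_eq_splitAux]
    exact splitAux_insA P [] none (by intro h; exact absurd rfl h) (fun _ => Or.inl rfl)
  rw [hwords]
  -- A's join loop, sliced, = '_'-join of the titled words
  have hA2 : (goB [] P).foldl (fun acc chuck => acc ++ (pyTitle chuck ++ ['_'])) []
      = ((goB [] P).map pyTitle).flatMap (fun w => w ++ ['_']) := by
    rw [PySem.List.foldl_append_eq_flatMap (fun chuck => pyTitle chuck ++ ['_'])]
    simp [List.flatMap_map]
  rw [hA2, PySem.List.slice_to_neg_one, flatMap_underscore_join]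
  -- B's fold = goB
  have hB : finishB (P.foldl stepB ([], [])) = goB [] P := by
    simpa using foldB_eq P [] []
  rw [← hB]
  rfl
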